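-- pv_equiv track=rewrite | github.com/oscarrobinson/py-advent-of-code | 2023_12/2023_12.py | get_dmg_groups
-- ===== SOURCE A (Python) =====
-- def get_dmg_groups(cond_record: str) -> list[int]:
--     dmg_groups = []
--     current_group = 0
--     for char in list(cond_record):
--         if char == "?":
--             break
--         elif char == "." and current_group > 0:
--             dmg_groups.append(current_group)
--             current_group = 0
--         elif char == "#":
--             current_group += 1
--     if current_group > 0:
--         dmg_groups.append(current_group)
--
--     return dmg_groups
-- ===== SOURCE B (Python) =====
-- def get_dmg_groups(cond_record: str) -> list[int]:
--     prefix = cond_record.split('?')[0]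
--     return [n for n in (seg.count('#') for seg in prefix.split('.')) if n > 0]
-- ===== Notes on version B (the rewrite author's own statement) =====
-- stated objective: simpler
-- what changed: Replaced the stateful single-pass accumulator (break flag, pending run counter, trailing flush) with a split-then-count pipeline: take the prefix before the first question mark, split it on dots, count the damaged-cell marks in each segment, and keep the positive counts.
import Mathlib
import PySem

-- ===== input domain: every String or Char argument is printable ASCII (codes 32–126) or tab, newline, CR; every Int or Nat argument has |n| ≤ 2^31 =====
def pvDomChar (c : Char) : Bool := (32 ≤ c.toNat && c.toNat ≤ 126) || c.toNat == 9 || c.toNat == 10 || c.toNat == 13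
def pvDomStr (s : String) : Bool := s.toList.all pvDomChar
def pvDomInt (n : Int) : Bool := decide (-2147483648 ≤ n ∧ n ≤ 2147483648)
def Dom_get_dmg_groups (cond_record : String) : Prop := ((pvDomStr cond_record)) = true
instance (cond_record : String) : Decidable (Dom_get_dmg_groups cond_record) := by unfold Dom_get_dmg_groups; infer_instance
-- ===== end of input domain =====

-- B replaces A's stateful accumulator loop (break flag, pending counter, trailing flush)
-- by a split-then-count pipeline over the prefix before the first '?'; objective: simpler.

-- ===== PORT A =====
-- the for-loop with break, carrying (dmg_groups, current_group); the trailing flush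
-- happens both at the end of the list and at the break.
def getDmgGo : List Char → List Int → Int → List Int
  | [], dmg_groups, current_group =>
      if current_group > 0 then dmg_groups ++ [current_group] else dmg_groups
  | c :: rest, dmg_groups, current_group =>
      if c = '?' then
        (if current_group > 0 then dmg_groups ++ [current_group] else dmg_groups)
      else if c = '.' ∧ current_group > 0 then
        getDmgGo rest (dmg_groups ++ [current_group]) 0
      else if c = '#' then
        getDmgGo rest dmg_groups (current_group + 1)
      else
        getDmgGo rest dmg_groups current_group

def get_dmg_groups (cond_record : String) : List Int :=
  getDmgGo cond_record.toList [] 0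

-- ===== PORT B =====
-- prefix = cond_record.split('?')[0]; [n for n in (seg.count('#') for seg in prefix.split('.')) if n > 0]
def get_dmg_groups_alt (cond_record : String) : List Int :=
  let pre := (cond_record.toList.splitOn '?').headD []
  ((pre.splitOn '.').map (fun seg => ((seg.count '#' : Nat) : Int))).filter (fun n => decide (n > 0))

-- ===== PRECONDITION & SPEC =====
def Spec_get_dmg_groups (cond_record : String) (out : List Int) : Prop := out = get_dmg_groups_alt cond_record
instance (cond_record : String) (out : List Int) : Decidable (Spec_get_dmg_groups cond_record out) := by unfold Spec_get_dmg_groups; infer_instance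

-- ===== CLAIM (what is proved, stated in full; the proofs are below) =====
def Claim_equal_get_dmg_groups : Prop := ∀ (cond_record : String), Dom_get_dmg_groups cond_record → Spec_get_dmg_groups cond_record (get_dmg_groups cond_record)

-- ===== LEMMAS AND PROOFS =====

-- the positive counts of the tail segments
def tailCounts (t : List (List Char)) : List Int :=
  (t.map (fun seg => ((seg.count '#' : Nat) : Int))).filter (fun n => decide (n > 0))

-- A's loop stops at the first '?': only the takeWhile prefix matters
theorem getDmgGo_takeWhile (cs : List Char) :
    ∀ acc cur, getDmgGo cs acc cur = getDmgGo (cs.takeWhile (fun c => !(c == '?'))) acc cur := by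
  induction cs with
  | nil => intro acc cur; rfl
  | cons c rest ih =>
    intro acc cur
    by_cases hq : c = '?'
    · subst hq; simp [getDmgGo, List.takeWhile]
    · have hb : (!(c == '?')) = true := by simp [hq]
      rw [List.takeWhile_cons, hb]
      by_cases hd : c = '.' ∧ cur > 0
      · simp [getDmgGo, hd, ih]
      · by_cases hh : c = '#'
        · simp [getDmgGo, hh, ih]
        · simp [getDmgGo, hh, ih]

-- first piece of a splitOnP is the takeWhile prefix
theorem headD_splitOnP (p : Char → Bool) (cs : List Char) :
    (List.splitOnP p cs).headD [] = cs.takeWhile (fun c => !(p c)) := by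
  induction cs with
  | nil => simp [List.splitOnP_nil, List.takeWhile]
  | cons c rest ih =>
    rw [List.splitOnP_cons]
    by_cases h : p c = true
    · simp [h, List.takeWhile]
    · obtain ⟨hd, tl, e⟩ := List.exists_cons_of_ne_nil (List.splitOnP_ne_nil p rest)
      simp only [Bool.not_eq_true] at h
      simp [h, List.takeWhile, e] at ih ⊢
      exact ih

-- the main loop invariant on a '?'-free list
theorem getDmgGo_eq (cs : List Char) (hq : ∀ c ∈ cs, c ≠ '?') :
    ∀ acc cur, 0 ≤ cur →
    getDmgGo cs acc cur =
      acc ++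
        (if cur + (((List.splitOnP (· == '.') cs).headD []).count '#' : Int) > 0
          then [cur + (((List.splitOnP (· == '.') cs).headD []).count '#' : Int)] else [])
        ++ tailCounts (List.splitOnP (· == '.') cs).tail := by
  induction cs with
  | nil =>
    intro acc cur _
    simp [getDmgGo, List.splitOnP_nil, tailCounts]
    split_ifs <;> simp
  | cons c rest ih =>
    intro acc cur hcur
    have hq' : ∀ x ∈ rest, x ≠ '?' := fun x hx => hq x (List.mem_cons_of_mem c hx)
    have hcq : c ≠ '?' := hq c List.mem_cons_self
    obtain ⟨hd, tl, e⟩ := List.exists_cons_of_ne_nil (List.splitOnP_ne_nil (· == '.') rest)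
    rw [List.splitOnP_cons]
    by_cases hdot : c = '.'
    · subst hdot
      simp only [beq_self_eq_true, if_true, List.headD_cons, List.tail_cons]
      by_cases hpos : cur > 0
      · have : ¬((('.' : Char) = '#')) := by decide
        simp only [getDmgGo, hcq, if_false, and_true, hpos, if_true, this, ite_true,
          reduceCtorEq, reduceIte]
        rw [ih hq' (acc ++ [cur]) 0 le_rfl, e]
        simp [tailCounts, hpos, List.count_nil, List.filter_cons, Int.natCast_pos,
          List.count_pos_iff]
        split_ifs <;> simp
      · have hc0 : cur = 0 := le_antisymm (by omega) hcur
        subst hc0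
        have : ¬((('.' : Char) = '?')) := by decide
        simp only [getDmgGo, this, if_false, gt_iff_lt, lt_irrefl, and_false, reduceCtorEq,
          reduceIte]
        rw [ih hq' acc 0 le_rfl, e]
        simp [tailCounts, List.count_nil, List.filter_cons, Int.natCast_pos,
          List.count_pos_iff]
        split_ifs <;> simp
    · have hcb : ((c == '.') = false) := by simp [hdot]
      rw [hcb]
      simp only [Bool.false_eq_true, if_false, e, List.modifyHead, List.headD_cons,
        List.tail_cons]
      by_cases hh : c = '#'
      · subst hh
        have : ¬(('#' : Char) = '.') := by decide
        simp only [getDmgGo, hcq, if_false, this, false_and, ite_true, ite_false,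
          reduceCtorEq, reduceIte]
        rw [ih hq' acc (cur + 1) (by omega), e]
        simp only [List.headD_cons, List.tail_cons, List.count_cons_self]
        have : cur + 1 + (hd.count '#' : Int) = cur + ((hd.count '#' + 1 : Nat) : Int) := by
          push_cast; ring
        rw [this]
      · simp only [getDmgGo, hcq, if_false, hdot, false_and, hh, ite_false, reduceIte]
        rw [ih hq' acc cur hcur, e]
        simp [List.count_cons, hh]

-- B's pipeline on the whole split list, split into head and tail
theorem tailCounts_cons (h : List Char) (t : List (List Char)) :
    tailCounts (h :: t) =
      (if (0:Int) + (h.count '#' : Int) > 0 then [(0:Int) + (h.count '#' : Int)] else [])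
        ++ tailCounts t := by
  simp [tailCounts, List.filter_cons, Int.natCast_pos, List.count_pos_iff]
  split_ifs <;> simp

-- ===== VERDICT (by name: the statement is the Claim_ definition above) =====
theorem get_dmg_groups_spec : Claim_equal_get_dmg_groups := by
  intro s _
  unfold Spec_get_dmg_groups get_dmg_groups get_dmg_groups_alt
  rw [getDmgGo_takeWhile]
  have hpre : (s.toList.splitOn '?').headD [] = s.toList.takeWhile (fun c => !(c == '?')) := by
    simpa [List.splitOn] using headD_splitOnP (· == '?') s.toList
  rw [hpre]
  set pre := s.toList.takeWhile (fun c => !(c == '?')) with hpredef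
  have hq : ∀ c ∈ pre, c ≠ '?' := by
    intro c hc
    have := List.mem_takeWhile_imp hc
    simpa using this
  rw [getDmgGo_eq pre hq [] 0 le_rfl]
  obtain ⟨hd, tl, e⟩ := List.exists_cons_of_ne_nil (List.splitOnP_ne_nil (· == '.') pre)
  show _ = tailCounts (List.splitOnP (· == '.') pre)
  rw [e, tailCounts_cons]
  simp
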